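-- pv_equiv track=rewrite | github.com/Antoha336/YoungAndYandex | Algorithm Training/1.0/3 Sets.py | task_f
-- ===== SOURCE A (Python) =====
-- def task_f(string_1, string_2):
--     gens_1 = {}
--     for i in range(len(string_1) - 1):
--         gen = string_1[i] + string_1[i + 1]
--         if gen in gens_1:
--             gens_1[gen] += 1
--         else:
--             gens_1[gen] = 1
--
--     gens_2 = {}
--     for i in range(len(string_2) - 1):
--         gen = string_2[i] + string_2[i + 1]
--         if gen in gens_2:
--             gens_2[gen] += 1
--         else:
--             gens_2[gen] = 1
--
--     gen_sum = 0
--     for key in gens_2.keys():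
--         if key in gens_1:
--             gen_sum += gens_1[key]
--
--     return gen_sum
-- ===== SOURCE B (Python) =====
-- def task_f(string_1, string_2):
--     b1 = sorted(string_1[i] + string_1[i + 1] for i in range(len(string_1) - 1))
--     b2 = sorted(string_2[i] + string_2[i + 1] for i in range(len(string_2) - 1))
--     total, i, j = 0, 0, 0
--     while i < len(b1) and j < len(b2):
--         if b1[i] < b2[j]:
--             i += 1
--         elif b1[i] > b2[j]:
--             j += 1
--         else:
--             total += 1
--             i += 1
--     return total
-- ===== Notes on version B (the rewrite author's own statement) =====
-- stated objective: alternative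
-- what changed: B replaces A's two hash frequency dictionaries by sorting: it sorts both strings' bigram lists and counts matching positions of string_1 with a two-pointer merge scan over the two sorted lists, with no dictionary or set at all.
import Mathlib
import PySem

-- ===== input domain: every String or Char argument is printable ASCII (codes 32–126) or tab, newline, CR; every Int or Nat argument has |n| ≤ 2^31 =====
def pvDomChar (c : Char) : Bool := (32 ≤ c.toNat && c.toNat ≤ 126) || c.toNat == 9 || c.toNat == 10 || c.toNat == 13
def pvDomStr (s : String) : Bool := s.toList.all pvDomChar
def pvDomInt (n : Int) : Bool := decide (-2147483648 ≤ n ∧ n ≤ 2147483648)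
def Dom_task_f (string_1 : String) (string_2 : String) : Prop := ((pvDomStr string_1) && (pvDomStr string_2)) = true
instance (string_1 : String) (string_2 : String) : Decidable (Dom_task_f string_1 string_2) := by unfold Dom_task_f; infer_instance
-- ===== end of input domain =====

-- B drops A's two hash dictionaries entirely: it sorts both bigram lists and counts
-- string_1's matching positions with a two-pointer merge scan (objective: alternative).
-- Bigram strings s[i]+s[i+1] are modelled as 2-character lists [c_i, c_{i+1}]; Python's
-- string '<' is exactly the lexicographic code-point '<' on List Char.

-- ===== PORT A =====
def task_f (string_1 : String) (string_2 : String) : Int :=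
  let s1 := string_1.toList
  let s2 := string_2.toList
  let gens_1 : PySem.Dict (List Char) Int :=
    (PySem.List.pyRange 0 ((s1.length : Int) - 1) 1).foldl
      (fun d i =>
        let gen := [PySem.List.pyGetD s1 i ' ', PySem.List.pyGetD s1 (i + 1) ' ']
        if d.contains gen then d.insert gen (d.getD gen 0 + 1) else d.insert gen 1)
      PySem.Dict.empty
  let gens_2 : PySem.Dict (List Char) Int :=
    (PySem.List.pyRange 0 ((s2.length : Int) - 1) 1).foldl
      (fun d i =>
        let gen := [PySem.List.pyGetD s2 i ' ', PySem.List.pyGetD s2 (i + 1) ' ']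
        if d.contains gen then d.insert gen (d.getD gen 0 + 1) else d.insert gen 1)
      PySem.Dict.empty
  gens_2.keys.foldl
    (fun acc key => if gens_1.contains key then acc + gens_1.getD key 0 else acc) 0

-- ===== PORT B =====
-- the 'while i < len(b1) and j < len(b2)' two-pointer loop, as recursion on the two
-- suffixes b1[i:], b2[j:] (each branch advances exactly the pointer the Python advances)
def pvMergeCount : List (List Char) → List (List Char) → Int
  | [], _ => 0
  | _ :: _, [] => 0
  | a :: l1, b :: l2 =>
    if a < b then pvMergeCount l1 (b :: l2)
    else if b < a then pvMergeCount (a :: l1) l2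
    else 1 + pvMergeCount l1 (b :: l2)
termination_by l1 l2 => l1.length + l2.length

def task_f_alt (string_1 : String) (string_2 : String) : Int :=
  let s1 := string_1.toList
  let s2 := string_2.toList
  let b1 := PySem.List.sorted
    ((PySem.List.pyRange 0 ((s1.length : Int) - 1) 1).map
      (fun i => [PySem.List.pyGetD s1 i ' ', PySem.List.pyGetD s1 (i + 1) ' ']))
    (fun x => x) false
  let b2 := PySem.List.sorted
    ((PySem.List.pyRange 0 ((s2.length : Int) - 1) 1).map
      (fun i => [PySem.List.pyGetD s2 i ' ', PySem.List.pyGetD s2 (i + 1) ' ']))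
    (fun x => x) false
  pvMergeCount b1 b2

-- ===== PRECONDITION & SPEC =====
def Spec_task_f (string_1 : String) (string_2 : String) (out : Int) : Prop := out = task_f_alt string_1 string_2
instance (string_1 : String) (string_2 : String) (out : Int) : Decidable (Spec_task_f string_1 string_2 out) := by unfold Spec_task_f; infer_instance

-- ===== CLAIM (what is proved, stated in full; the proofs are below) =====
def Claim_equal_task_f : Prop := ∀ (string_1 : String) (string_2 : String), Dom_task_f string_1 string_2 → Spec_task_f string_1 string_2 (task_f string_1 string_2)

-- ===== LEMMAS AND PROOFS =====

-- the list of bigrams of l, in textual order (with multiplicity)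
def pvBigrams (l : List Char) : List (List Char) :=
  (l.zip l.tail).map (fun p => [p.1, p.2])

theorem pvBigrams_length (l : List Char) : (pvBigrams l).length = l.length - 1 := by
  simp [pvBigrams]

theorem pvBigrams_getElem (l : List Char) (i : Nat) (h0 : i < (pvBigrams l).length)
    (h1 : i < l.length) (h2 : i + 1 < l.length) :
    (pvBigrams l)[i]'h0 = [l[i]'h1, l[i+1]'h2] := by
  simp [pvBigrams, List.getElem_zip, List.getElem_tail]

-- a loop 'for i in range(len(l)-1): … l[i], l[i+1] …' is a fold over the bigram list
theorem pv_foldl_pyRange_bigrams {β : Type} (l : List Char) (d : Char)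
    (f : β → List Char → β) (init : β) :
    (PySem.List.pyRange 0 ((l.length : Int) - 1) 1).foldl
      (fun acc i => f acc [PySem.List.pyGetD l i d, PySem.List.pyGetD l (i + 1) d]) init
    = (pvBigrams l).foldl f init := by
  cases l with
  | nil =>
    have h0 : PySem.List.pyRange 0 (((List.nil (α := Char)).length : Int) - 1) 1 = [] := by
      decide
    rw [h0]
    simp [pvBigrams]
  | cons a t =>
    have h1 : (((a :: t).length : Int)) - 1 = ((t.length : Nat) : Int) := by
      simp
    rw [h1, PySem.List.pyRange_zero_natCast, List.foldl_map]
    have h2 : (pvBigrams (a :: t)) =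
        (List.range t.length).map
          (fun i => [(a :: t).getD i d, (a :: t).getD (i + 1) d]) := by
      apply List.ext_getElem
      · simp [pvBigrams_length]
      · intro i h h'
        have hi : i < t.length := by simpa using h'
        simp only [List.getElem_map, List.getElem_range]
        rw [pvBigrams_getElem (a :: t) i (by simpa using h) (by simp; omega) (by simp; omega),
            List.getD_eq_getElem _ _ (by simp; omega),
            List.getD_eq_getElem _ _ (by simp; omega)]
    rw [h2, List.foldl_map]
    congr 1
    funext x y
    have h3 : ((y : Int) + 1) = ((y + 1 : Nat) : Int) := by push_cast; ring
    rw [h3, PySem.List.pyGetD_natCast, PySem.List.pyGetD_natCast]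

-- the map form of the same loop (B's generator expression)
theorem pv_map_pyRange_bigrams (l : List Char) (d : Char) :
    (PySem.List.pyRange 0 ((l.length : Int) - 1) 1).map
      (fun i => [PySem.List.pyGetD l i d, PySem.List.pyGetD l (i + 1) d])
    = pvBigrams l := by
  cases l with
  | nil =>
    have h0 : PySem.List.pyRange 0 (((List.nil (α := Char)).length : Int) - 1) 1 = [] := by
      decide
    rw [h0]
    simp [pvBigrams]
  | cons a t =>
    have h1 : (((a :: t).length : Int)) - 1 = ((t.length : Nat) : Int) := by
      simp
    rw [h1, PySem.List.pyRange_zero_natCast, List.map_map]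
    apply List.ext_getElem
    · simp [pvBigrams_length]
    · intro i h h'
      have hi : i < t.length := by simpa using h
      simp only [List.getElem_map, List.getElem_range, Function.comp]
      rw [pvBigrams_getElem (a :: t) i (by simpa using h') (by simp; omega) (by simp; omega)]
      have h3 : ((i : Int) + 1) = ((i + 1 : Nat) : Int) := by push_cast; ring
      rw [h3, PySem.List.pyGetD_natCast, PySem.List.pyGetD_natCast,
          List.getD_eq_getElem _ _ (by simp; omega), List.getD_eq_getElem _ _ (by simp; omega)]

-- A's counting branch is the counter step
theorem pv_count_step_eq :
    (fun (d : PySem.Dict (List Char) Int) (gen : List Char) =>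
        if d.contains gen then d.insert gen (d.getD gen 0 + 1) else d.insert gen 1)
    = fun d gen => d.insert gen (d.getD gen 0 + 1) := by
  funext d gen
  by_cases h : d.contains gen = true
  · simp [h]
  · have h' : d.contains gen = false := by simpa using h
    simp [h', PySem.Dict.getD_of_not_contains]

-- A's first two loops build exactly the bigram counter
theorem pvA_loop (l : List Char) :
    (PySem.List.pyRange 0 ((l.length : Int) - 1) 1).foldl
      (fun d i =>
        let gen := [PySem.List.pyGetD l i ' ', PySem.List.pyGetD l (i + 1) ' ']
        if d.contains gen then d.insert gen (d.getD gen 0 + 1) else d.insert gen 1)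
      PySem.Dict.empty
    = PySem.Dict.counter (pvBigrams l) := by
  have h2 : (pvBigrams l).foldl
      (fun (d : PySem.Dict (List Char) Int) gen =>
        if d.contains gen then d.insert gen (d.getD gen 0 + 1) else d.insert gen 1)
      PySem.Dict.empty = PySem.Dict.counter (pvBigrams l) := by
    rw [pv_count_step_eq]
    exact PySem.Dict.foldl_insert_getD_add_one_eq_counter _
  exact (pv_foldl_pyRange_bigrams l ' '
    (fun (d : PySem.Dict (List Char) Int) gen =>
      if d.contains gen then d.insert gen (d.getD gen 0 + 1) else d.insert gen 1)
    PySem.Dict.empty).trans h2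

-- indicator sum over a nodup list
theorem pv_sum_indicator (D : List (List Char)) (a : List Char) (hD : D.Nodup) :
    (D.map (fun k => if a = k then (1 : Int) else 0)).sum
      = if a ∈ D then (1 : Int) else 0 := by
  induction D with
  | nil => simp
  | cons b D ih =>
    simp only [List.map_cons, List.sum_cons, List.mem_cons]
    rcases List.nodup_cons.mp hD with ⟨hb, hD'⟩
    by_cases hab : a = b
    · subst hab
      simp [ih hD', hb]
    · simp [hab, ih hD']

-- summing B1-counts over a nodup key list D = counting B1-positions whose value lies in D
theorem pv_sum_count_eq_countP (B1 D : List (List Char)) (hD : D.Nodup) :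
    (D.map (fun k => (B1.count k : Int))).sum
      = (B1.countP (fun g => decide (g ∈ D)) : Int) := by
  induction B1 with
  | nil => simp
  | cons a B1 ih =>
    have hmap : (D.map (fun k => ((a :: B1).count k : Int)))
        = D.map (fun k => (B1.count k : Int) + if a = k then 1 else 0) := by
      apply List.map_congr_left
      intro k _
      rw [List.count_cons]
      by_cases hk : k = a
      · subst hk
        push_cast
        simp
      · push_cast
        simp [Ne.symm hk]
    rw [hmap, PySem.List.sum_map_add_int, ih, List.countP_cons,
        pv_sum_indicator D a hD]
    by_cases h : a ∈ D <;> simp [h]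

-- A's third loop on the two counters counts the B1-positions whose bigram occurs in B2
theorem pvA_main (B1 B2 : List (List Char)) :
    (PySem.Dict.counter B2).keys.foldl
      (fun acc key =>
        if (PySem.Dict.counter B1).contains key
        then acc + (PySem.Dict.counter B1).getD key 0 else acc) 0
    = (B1.countP (fun g => decide (g ∈ B2)) : Int) := by
  rw [PySem.Dict.keys_counter]
  have hstep : ∀ (acc : Int) (key : List Char), key ∈ PySem.Set.ofList B2 →
      (if (PySem.Dict.counter B1).contains key
       then acc + (PySem.Dict.counter B1).getD key 0 else acc)
      = acc + (B1.count key : Int) := by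
    intro acc key _
    by_cases h : key ∈ B1
    · have hc : (PySem.Dict.counter B1).contains key = true := by
        rw [PySem.Dict.contains_iff_mem_keys, PySem.Dict.keys_counter,
            PySem.Set.mem_ofList]
        exact h
      rw [if_pos hc, PySem.Dict.getD_counter]
    · have hc : ¬ (PySem.Dict.counter B1).contains key = true := by
        rw [PySem.Dict.contains_iff_mem_keys, PySem.Dict.keys_counter,
            PySem.Set.mem_ofList]
        exact h
      rw [if_neg hc, List.count_eq_zero.mpr h]
      simp
  rw [PySem.List.foldl_congr_mem _ _ _ _ hstep, PySem.List.foldl_add, zero_add,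
      pv_sum_count_eq_countP B1 (PySem.Set.ofList B2) (PySem.Set.nodup_ofList B2)]
  congr 1
  apply List.countP_congr
  intro g _
  simp [PySem.Set.mem_ofList]

-- the merge scan on two ≤-sorted lists counts l1's positions with a value in l2
theorem pvMergeCount_eq (l1 l2 : List (List Char))
    (h1 : l1.Pairwise (· ≤ ·)) (h2 : l2.Pairwise (· ≤ ·)) :
    pvMergeCount l1 l2 = (l1.countP (fun g => decide (g ∈ l2)) : Int) := by
  fun_induction pvMergeCount l1 l2 with
  | case1 l2 => simp
  | case2 a l1 => simp
  | case3 a l1 b l2 hab ih =>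
    rcases List.pairwise_cons.mp h1 with ⟨_, h1'⟩
    rw [ih h1' h2, List.countP_cons]
    have hnb : a ∉ b :: l2 := by
      intro hmem
      rcases List.mem_cons.mp hmem with rfl | hm
      · exact lt_irrefl a hab
      · exact absurd ((List.pairwise_cons.mp h2).1 a hm) (not_le.mpr hab)
    simp [hnb]
  | case4 a l1 b l2 hab hba ih =>
    rcases List.pairwise_cons.mp h2 with ⟨_, h2'⟩
    have hcongr : List.countP (fun g => decide (g ∈ b :: l2)) (a :: l1)
        = List.countP (fun g => decide (g ∈ l2)) (a :: l1) := by
      apply List.countP_congr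
      intro x hx
      have hax : a ≤ x := by
        rcases List.mem_cons.mp hx with rfl | hm
        · exact le_refl x
        · exact (List.pairwise_cons.mp h1).1 x hm
      have hxb : x ≠ b := fun h => absurd (h ▸ hax) (not_le.mpr hba)
      simp [List.mem_cons, hxb]
    rw [ih h1 h2', hcongr]
  | case5 a l1 b l2 hab hba ih =>
    have heq : a = b := le_antisymm (not_lt.mp hba) (not_lt.mp hab)
    rcases List.pairwise_cons.mp h1 with ⟨_, h1'⟩
    rw [ih h1' h2, List.countP_cons]
    have : a ∈ b :: l2 := by simp [heq]
    simp [this]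
    ring

-- bridge: the port's inferred LT/DecidableLT instances on List Char are the LinearOrder ones
theorem pv_sorted_inst (xs : List (List Char)) :
    @PySem.List.sorted (List Char) (List Char) List.instLT (fun a b => a.decidableLT b) xs (fun x => x) false
    = @PySem.List.sorted (List Char) (List Char) List.instLinearOrder.toLT LinearOrder.toDecidableLT xs (fun x => x) false := by
  have hD : (fun (a b : List Char) => a.decidableLT b) = (LinearOrder.toDecidableLT : DecidableLT (List Char)) := by
    funext a b; exact Subsingleton.elim _ _
  rw [hD]

-- ===== VERDICT (by name: the statement is the Claim_ definition above) =====
theorem task_f_spec : Claim_equal_task_f := by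
  intro string_1 string_2 _
  show task_f string_1 string_2 = task_f_alt string_1 string_2
  unfold task_f task_f_alt
  simp only [pvA_loop, pv_map_pyRange_bigrams]
  rw [pvA_main, pv_sorted_inst, pv_sorted_inst,
      pvMergeCount_eq _ _ (PySem.List.sorted_pairwise _ _) (PySem.List.sorted_pairwise _ _)]
  rw [List.Perm.countP_eq _ (@PySem.List.sorted_perm (List Char) (List Char)
      List.instLinearOrder.toLT LinearOrder.toDecidableLT (pvBigrams string_1.toList)
      (fun x => x) false)]
  congr 1
  apply List.countP_congr
  intro g _
  simp [PySem.List.mem_sorted]
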